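-- pv_equiv track=rewrite | github.com/cognifex/mos-ai-k | kachelbilder.py | _pattern_vertical_stripes
-- ===== SOURCE A (Python) =====
-- def _pattern_vertical_stripes(width=15, height=10, symbols="ABCDE"):
--     rows = []
--     length = len(symbols)
--     for y in range(height):
--         row = []
--         for x in range(width):
--             row.append(symbols[(x // 2) % length])
--         rows.append("".join(row))
--     return "\n".join(rows)
-- ===== SOURCE B (Python) =====
-- def _pattern_vertical_stripes(width=15, height=10, symbols="ABCDE"):
--     if height <= 0:
--         return ""
--     doubled = "".join(ch + ch for ch in symbols)
--     row = (doubled * (width // len(doubled) + 1))[:width] if width > 0 else ""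
--     return "\n".join([row] * height)
-- ===== Notes on version B (the rewrite author's own statement) =====
-- stated objective: alternative
-- what changed: Instead of A's nested y/x loops evaluating symbols[(x//2)%len] for every cell, B doubles each symbol once ('AABBCC...'), tiles that string by repetition and slices it to width, then replicates the single row height times; Pre_ excludes empty symbols with positive width and height, where both programs raise ZeroDivisionError.
import Mathlib
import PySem

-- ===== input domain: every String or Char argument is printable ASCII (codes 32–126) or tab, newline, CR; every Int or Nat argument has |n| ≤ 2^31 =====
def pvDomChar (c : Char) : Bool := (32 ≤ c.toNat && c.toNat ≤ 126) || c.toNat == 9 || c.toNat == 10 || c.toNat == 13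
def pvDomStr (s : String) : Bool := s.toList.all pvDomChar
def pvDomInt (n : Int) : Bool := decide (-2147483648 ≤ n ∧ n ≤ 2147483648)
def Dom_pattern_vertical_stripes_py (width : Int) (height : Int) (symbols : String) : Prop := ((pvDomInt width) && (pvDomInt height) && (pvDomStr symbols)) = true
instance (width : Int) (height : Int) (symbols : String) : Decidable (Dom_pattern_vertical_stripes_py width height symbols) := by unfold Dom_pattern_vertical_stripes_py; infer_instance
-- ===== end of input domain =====

-- B replaces A's per-cell indexing by string tiling: double each symbol once, tile that
-- string by repetition and slice it to one row, then replicate the row height times.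

-- ===== PORT A =====
-- A: nested loops; for each y rebuild the row character list by appends, join rows with '\n'.
def pattern_vertical_stripes_py (width : Int) (height : Int) (symbols : String) : String :=
  let length : Int := PySem.Str.len symbols
  let rows : List String :=
    (PySem.List.pyRange 0 height 1).foldl (fun rows _y =>
      let row : List Char :=
        (PySem.List.pyRange 0 width 1).foldl (fun row x =>
          row ++ [(PySem.Str.pyGet? symbols (PySem.Int.mod (PySem.Int.floordiv x 2) length)).getD ' ']) []
      rows ++ [String.ofList row]) []
  PySem.Str.join "\n" rows

-- ===== PORT B =====
-- B: early return for height ≤ 0; doubled = ''.join(ch+ch for ch in symbols);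
-- row = (doubled * (width // len(doubled) + 1))[:width] if width > 0 else '';
-- result = '\n'.join([row] * height).  Python's string repetition and slicing are
-- ported on the code-point list (PySem.List.pyRepeat / slice), exact for strings.
def pattern_vertical_stripes_py_alt (width : Int) (height : Int) (symbols : String) : String :=
  if height ≤ 0 then "" else
  let doubled : String := PySem.Str.join "" (symbols.toList.map (fun ch => String.ofList [ch, ch]))
  let row : String :=
    if 0 < width then
      String.ofList (PySem.List.slice
        (PySem.List.pyRepeat doubled.toList (PySem.Int.floordiv width (PySem.Str.len doubled) + 1))
        none (some width))
    else ""
  PySem.Str.join "\n" (List.replicate height.toNat row)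

-- ===== PRECONDITION & SPEC =====
-- Pre_ excludes exactly the inputs where Python A raises: with empty symbols and positive
-- width and height, symbols[(x//2) % 0] raises ZeroDivisionError (B raises there too).
def Pre_pattern_vertical_stripes_py (width : Int) (height : Int) (symbols : String) : Prop :=
  height ≤ 0 ∨ width ≤ 0 ∨ symbols ≠ ""
instance (width : Int) (height : Int) (symbols : String) : Decidable (Pre_pattern_vertical_stripes_py width height symbols) := by unfold Pre_pattern_vertical_stripes_py; infer_instance
def pvWitness_pattern_vertical_stripes_py : Int × Int × String := (4, 3, "AB")

def Spec_pattern_vertical_stripes_py (width : Int) (height : Int) (symbols : String) (out : String) : Prop := out = pattern_vertical_stripes_py_alt width height symbols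
instance (width : Int) (height : Int) (symbols : String) (out : String) : Decidable (Spec_pattern_vertical_stripes_py width height symbols out) := by unfold Spec_pattern_vertical_stripes_py; infer_instance

-- ===== CLAIM (what is proved, stated in full; the proofs are below) =====
def Claim_equal_pattern_vertical_stripes_py : Prop := ∀ (width : Int) (height : Int) (symbols : String), Dom_pattern_vertical_stripes_py width height symbols → Pre_pattern_vertical_stripes_py width height symbols → Spec_pattern_vertical_stripes_py width height symbols (pattern_vertical_stripes_py width height symbols)

-- ===== LEMMAS AND PROOFS =====

-- tiling: the i-th element of k concatenated copies of xs is xs[i % len xs], for i inside the tiling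
theorem getElem?_flatten_replicate {α : Type} (xs : List α) :
    ∀ (k i : Nat), i < k * xs.length →
      ((List.replicate k xs).flatten)[i]? = xs[i % xs.length]? := by
  intro k
  induction k with
  | zero => intro i h; omega
  | succ k ih =>
      intro i h
      rw [Nat.succ_mul] at h
      rw [List.replicate_succ, List.flatten_cons, List.getElem?_append]
      by_cases hi : i < xs.length
      · simp [hi, Nat.mod_eq_of_lt hi]
      · have hle : xs.length ≤ i := Nat.le_of_not_lt hi
        simp only [hi, ite_false]
        rw [ih (i - xs.length) (by omega), Nat.mod_eq_sub_mod hle]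

-- doubling: the j-th char of ''.join(c+c for c in s) is s[j/2]
theorem getElem?_flatten_double (s : List Char) :
    ∀ (j : Nat), ((s.map (fun c => [c, c])).flatten)[j]? = s[j / 2]? := by
  induction s with
  | nil => intro j; simp
  | cons c t ih =>
      intro j
      match j with
      | 0 => simp
      | 1 => simp
      | (n+2) =>
          simp only [List.map_cons, List.flatten_cons]
          rw [show ([c,c] : List Char) ++ _ = c :: c :: (t.map (fun c => [c,c])).flatten from rfl]
          simp [ih n, Nat.add_div_right]

-- arithmetic behind the two routes to the stripe character
theorem mod_double_div_two (L n : Nat) (hL : 0 < L) : (n % (2 * L)) / 2 = (n / 2) % L := by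
  have h1 := Nat.div_add_mod n (2 * L)
  have h2 : n % (2 * L) < 2 * L := Nat.mod_lt _ (by omega)
  set q := n / (2 * L) with hq
  set r := n % (2 * L) with hr
  have hx : 2 * L * q = 2 * (L * q) := by ring
  have hn : n = r + 2 * (L * q) := by omega
  have : n / 2 = r / 2 + L * q := by rw [hn, Nat.add_mul_div_left _ _ (by omega : 0 < 2)]
  rw [this, Nat.add_mul_mod_self_left, Nat.mod_eq_of_lt (by omega : r / 2 < L)]

theorem length_flatten_double (s : List Char) :
    ((s.map (fun c => [c, c])).flatten).length = 2 * s.length := by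
  induction s with
  | nil => simp
  | cons c t ih => simp [ih]; omega

theorem intercalate_nil_flatten (ls : List (List Char)) : [].intercalate ls = ls.flatten := by
  induction ls with
  | nil => simp [List.intercalate]
  | cons h t ih => simp [List.intercalate] at ih ⊢; cases t <;> simp_all

theorem doubled_toList (symbols : String) :
    (PySem.Str.join "" (symbols.toList.map (fun ch => String.ofList [ch, ch]))).toList
      = (symbols.toList.map (fun c => [c, c])).flatten := by
  rw [PySem.Str.toList_join]
  have he : ("" : String).toList = [] := by simp
  simp only [PySem.Chars.join, he, intercalate_nil_flatten, List.map_map]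
  apply congrArg List.flatten
  apply List.map_congr_left
  intro ch _
  simp [Function.comp]

-- the single row computed both ways: per-cell indexing vs tile-and-slice
theorem row_eq (width : Int) (symbols : String) (hw : 0 < width) (hs : symbols ≠ "") :
    (PySem.List.pyRange 0 width 1).map (fun x =>
        (PySem.Str.pyGet? symbols (PySem.Int.mod (PySem.Int.floordiv x 2) (PySem.Str.len symbols))).getD ' ')
      = PySem.List.slice
          (PySem.List.pyRepeat
            (PySem.Str.join "" (symbols.toList.map (fun ch => String.ofList [ch, ch]))).toList
            (PySem.Int.floordiv width
              (PySem.Str.len (PySem.Str.join "" (symbols.toList.map (fun ch => String.ofList [ch, ch])))) + 1))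
          none (some width) := by
  set s := symbols.toList with hsdef
  have hL : 0 < s.length := by
    rw [hsdef, List.length_pos_iff]
    exact fun h => hs (String.toList_inj.mp (by simp [h]))
  set L := s.length with hLdef
  obtain ⟨w, hw'⟩ : ∃ w : Nat, width = (w : Int) := ⟨width.toNat, by omega⟩
  have hwpos : 0 < w := by omega
  subst hw'
  rw [PySem.List.slice_to_natCast]
  rw [doubled_toList]
  have hdl : ((s.map (fun c => [c, c])).flatten).length = 2 * L := length_flatten_double s
  have hlen : PySem.Str.len (PySem.Str.join "" (s.map (fun ch => String.ofList [ch, ch]))) = ((2 * L : Nat) : Int) := by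
    rw [PySem.Str.len_eq, doubled_toList, hdl]
  rw [hlen]
  have hfd : PySem.Int.floordiv ((w : Nat) : Int) ((2 * L : Nat) : Int) + 1 = ((w / (2 * L) + 1 : Nat) : Int) := by
    rw [PySem.Int.floordiv_natCast]; push_cast; ring
  rw [hfd]
  set k : Nat := w / (2 * L) + 1 with hk
  have hkw : w < k * (2 * L) := by
    have h1 := Nat.div_add_mod w (2 * L)
    have h2 : w % (2 * L) < 2 * L := Nat.mod_lt _ (by omega)
    have hx : k * (2 * L) = 2 * L * (w / (2 * L)) + 2 * L := by rw [hk]; ring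
    omega
  apply List.ext_getElem?
  intro i
  rw [PySem.List.pyRange_zero_natCast]
  simp only [PySem.List.pyRepeat, Int.toNat_natCast]
  by_cases hi : i < w
  · rw [List.map_map, List.getElem?_map, List.getElem?_range hi]
    rw [List.getElem?_take, if_pos hi]
    rw [← hsdef]
    rw [getElem?_flatten_replicate _ k i (by rw [hdl]; omega)]
    rw [hdl, getElem?_flatten_double, mod_double_div_two L i hL]
    simp only [Option.map_some, Function.comp_apply]
    rw [show PySem.Int.floordiv ((i : Nat) : Int) 2 = ((i / 2 : Nat) : Int) from PySem.Int.floordiv_natCast i 2]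
    rw [show PySem.Str.len symbols = ((L : Nat) : Int) from by rw [PySem.Str.len_eq]]
    rw [PySem.Int.mod_natCast, PySem.Str.pyGet?_natCast]
    have hidx : i / 2 % L < L := Nat.mod_lt _ hL
    rw [← hsdef, List.getElem?_eq_getElem hidx]
    simp
  · rw [List.getElem?_take, if_neg hi,
        List.getElem?_eq_none (by simpa using Nat.le_of_not_lt hi)]

-- ===== VERDICT (by name: the statement is the Claim_ definition above) =====
theorem pattern_vertical_stripes_py_spec : Claim_equal_pattern_vertical_stripes_py := by
  intro width height symbols _hDom hPre
  unfold Spec_pattern_vertical_stripes_py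
  unfold pattern_vertical_stripes_py pattern_vertical_stripes_py_alt
  by_cases hh : height ≤ 0
  · have hr : PySem.List.pyRange 0 height 1 = [] := by
      simp [PySem.List.pyRange_one]
      omega
    simp [hh, hr, PySem.Str.join]
  · simp only [hh, if_false]
    rw [PySem.List.foldl_append_singleton_eq_map, List.map_const', PySem.List.length_pyRange_one]
    have hhn : (height - 0).toNat = height.toNat := by omega
    rw [hhn]
    congr 1
    apply congrArg
    apply congrArg
    by_cases hw : 0 < width
    · have hsne : symbols ≠ "" := by
        rcases hPre with h | h | h
        · omega
        · omega
        · exact h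
      rw [if_pos hw, PySem.List.foldl_append_singleton_eq_map, List.nil_append]
      apply congrArg
      exact row_eq width symbols hw hsne
    · rw [if_neg hw]
      have hr : PySem.List.pyRange 0 width 1 = [] := by
        simp [PySem.List.pyRange_one]; omega
      simp [hr]
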